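-- pv_equiv track=rewrite | github.com/Algorithm-bbackgongdan/Almut-2nd | code/kauthenticity/week5/boj_3665.py | makeRanksToGraph
-- ===== SOURCE A (Python) =====
-- def makeRanksToGraph(ranks, n):
--     graph = [[False for _ in range(n + 1)] for _ in range(n + 1)]
--     indegree = [0 for _ in range(n + 1)]
--
--     for i in range(len(ranks) - 1):
--         cur = ranks[i]
--         for j in range(i + 1, len(ranks)):
--             next = ranks[j]
--             graph[cur][next] = True
--             indegree[next] += 1
--
--     return graph, indegree
-- ===== SOURCE B (Python) =====
-- def makeRanksToGraph(ranks, n):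
--     graph = [[False] * (n + 1) for _ in range(n + 1)]
--     indegree = [0] * (n + 1)
--
--     # the value at position j has exactly j predecessors in the ranking
--     for j, v in enumerate(ranks[1:], 1):
--         indegree[v] += j
--
--     # peel the ranking front-to-back: the head gets an edge to every later entry
--     suffix = ranks
--     while suffix:
--         cur, suffix = suffix[0], suffix[1:]
--         for nxt in suffix:
--             graph[cur][nxt] = True
--
--     return graph, indegree
-- ===== Notes on version B (the rewrite author's own statement) =====
-- stated objective: alternative
-- what changed: A fills the matrix and indegree together in one fused index-based double loop; B computes indegree in a single flat weighted pass (position j gets +j since it has exactly j predecessors, duplicates included) and fills the matrix by structurally peeling the list head-by-head, each head folding over its suffix, with no index arithmetic.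
import Mathlib
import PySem

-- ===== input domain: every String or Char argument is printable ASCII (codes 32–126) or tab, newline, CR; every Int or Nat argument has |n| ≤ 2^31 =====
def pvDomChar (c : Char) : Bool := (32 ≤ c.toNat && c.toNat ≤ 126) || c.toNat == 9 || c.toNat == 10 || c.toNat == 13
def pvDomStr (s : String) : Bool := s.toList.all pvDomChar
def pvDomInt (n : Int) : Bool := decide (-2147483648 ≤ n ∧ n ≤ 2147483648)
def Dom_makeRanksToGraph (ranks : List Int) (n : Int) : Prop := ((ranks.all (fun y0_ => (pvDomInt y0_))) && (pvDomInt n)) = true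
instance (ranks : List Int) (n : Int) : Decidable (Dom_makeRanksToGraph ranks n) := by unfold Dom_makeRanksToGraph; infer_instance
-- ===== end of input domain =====

-- B splits A's fused index-driven double loop: indegree is one flat weighted pass (position j
-- gets +j, having exactly j predecessors) and the matrix is filled by structurally peeling the
-- list head-by-head with a fold over each suffix; objective: alternative.


-- shared helpers: Python list read/write at a possibly negative index; exact for indices in
-- [-len, len-1] (Pre_ excludes exactly the out-of-range accesses, on which Python raises IndexError)
def pyIdx (len : Nat) (i : Int) : Nat := (if i < 0 then i + len else i).toNat

def pySetAt {α : Type} (xs : List α) (i : Int) (v : α) : List α :=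
  xs.set (pyIdx xs.length i) v

def pyGetAt {α : Type} (xs : List α) (i : Int) (d : α) : α :=
  xs.getD (pyIdx xs.length i) d

-- graph[cur][next] = True
def setEdge (g : List (List Bool)) (cur next : Int) : List (List Bool) :=
  pySetAt g cur (pySetAt (pyGetAt g cur []) next true)

-- indegree[v] += w
def bumpAt (ind : List Int) (v : Int) (w : Int) : List Int :=
  pySetAt ind v (pyGetAt ind v 0 + w)

-- ===== PORT A =====
def makeRanksToGraph (ranks : List Int) (n : Int) : List (List Bool) × List Int :=
  let N := (n + 1).toNat
  let graph := List.replicate N (List.replicate N false)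
  let indegree := List.replicate N (0 : Int)
  let L := ranks.length
  (List.range (L - 1)).foldl
    (fun st i =>
      let cur := ranks.getD i 0
      (List.range' (i + 1) (L - (i + 1))).foldl
        (fun st j =>
          let next := ranks.getD j 0
          (setEdge st.1 cur next, bumpAt st.2 next 1)) st)
    (graph, indegree)

-- ===== PORT B =====
-- "for j, v in enumerate(ranks[1:], 1): indegree[v] += j"
def fillIndeg : List Int → Int → List Int → List Int
  | [], _, ind => ind
  | v :: vs, j, ind => fillIndeg vs (j + 1) (bumpAt ind v j)

-- "while suffix: cur, suffix = suffix[0], suffix[1:]; for nxt in suffix: graph[cur][nxt] = True"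
def fillGraph : List (List Bool) → List Int → List (List Bool)
  | g, [] => g
  | g, cur :: rest => fillGraph (rest.foldl (fun g nxt => setEdge g cur nxt) g) rest

def makeRanksToGraph_alt (ranks : List Int) (n : Int) : List (List Bool) × List Int :=
  let N := (n + 1).toNat
  let graph := List.replicate N (List.replicate N false)
  let indegree := List.replicate N (0 : Int)
  let indegree := fillIndeg (ranks.drop 1) 1 indegree
  let graph := fillGraph graph ranks
  (graph, indegree)

-- ===== PRECONDITION & SPEC =====
-- Pre_ is exactly the set of inputs on which the Python A returns: with at least two entries,
-- every entry must be a valid (possibly negative) Python index into the n+1 rows/slots,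
-- otherwise A raises IndexError.
def Pre_makeRanksToGraph (ranks : List Int) (n : Int) : Prop :=
  ranks.length ≤ 1 ∨ ∀ v ∈ ranks, -(n + 1) ≤ v ∧ v ≤ n
instance (ranks : List Int) (n : Int) : Decidable (Pre_makeRanksToGraph ranks n) := by
  unfold Pre_makeRanksToGraph; infer_instance

def pvWitness_makeRanksToGraph : List Int × Int := ([2, 0, 1], 2)

def Spec_makeRanksToGraph (ranks : List Int) (n : Int) (out : List (List Bool) × List Int) : Prop := out = makeRanksToGraph_alt ranks n
instance (ranks : List Int) (n : Int) (out : List (List Bool) × List Int) : Decidable (Spec_makeRanksToGraph ranks n out) := by unfold Spec_makeRanksToGraph; infer_instance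

-- ===== CLAIM (what is proved, stated in full; the proofs are below) =====
def Claim_equal_makeRanksToGraph : Prop := ∀ (ranks : List Int) (n : Int), Dom_makeRanksToGraph ranks n → Pre_makeRanksToGraph ranks n → Spec_makeRanksToGraph ranks n (makeRanksToGraph ranks n)

-- ===== LEMMAS AND PROOFS =====

-- bumpAt at a resolved Nat index
def natBump (ind : List Int) (p : Nat) (w : Int) : List Int := ind.set p (ind.getD p 0 + w)

theorem natBump_getElem? (ind : List Int) (p : Nat) (w : Int) (q : Nat) :
    (natBump ind p w)[q]? = if q = p then (ind[q]?.map (· + w)) else ind[q]? := by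
  simp [natBump, List.getElem?_set, List.getD]
  by_cases h : p = q
  · subst h
    by_cases hl : p < ind.length
    · simp [hl]
    · simp [hl]
  · simp [h, Ne.symm h]

theorem natBump_add (ind : List Int) (p : Nat) (w t : Int) :
    natBump (natBump ind p w) p t = natBump ind p (w + t) := by
  apply List.ext_getElem?
  intro r
  simp only [natBump_getElem?]
  by_cases h : r = p
  · simp [h]
  · simp [h]

theorem natBump_comm (ind : List Int) (p : Nat) (w : Int) (q : Nat) (t : Int) :
    natBump (natBump ind p w) q t = natBump (natBump ind q t) p w := by
  by_cases hpq : p = q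
  · subst hpq; rw [natBump_add, natBump_add, Int.add_comm]
  · apply List.ext_getElem?
    intro r
    simp only [natBump_getElem?]
    by_cases h1 : r = p
    · have h2 : ¬ r = q := by rw [h1]; exact hpq
      simp [h1, fun h : p = q => hpq h]
    · by_cases h2 : r = q
      · simp [h2, Ne.symm hpq]
      · simp [h1, h2]

theorem natBump_zero (ind : List Int) (p : Nat) : natBump ind p 0 = ind := by
  apply List.ext_getElem?
  intro r
  simp only [natBump_getElem?]
  by_cases h : r = p
  · simp [h]
  · simp [h]

theorem natBump_length (ind : List Int) (p : Nat) (w : Int) : (natBump ind p w).length = ind.length := by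
  simp [natBump]

theorem bumpAt_eq_natBump (ind : List Int) (v w : Int) :
    bumpAt ind v w = natBump ind (pyIdx ind.length v) w := rfl

theorem bumpAt_comm (ind : List Int) (v w u t : Int) :
    bumpAt (bumpAt ind v w) u t = bumpAt (bumpAt ind u t) v w := by
  simp only [bumpAt_eq_natBump, natBump_length]
  exact natBump_comm ..

theorem bumpAt_add (ind : List Int) (v w t : Int) :
    bumpAt (bumpAt ind v w) v t = bumpAt ind v (w + t) := by
  simp only [bumpAt_eq_natBump, natBump_length]
  exact natBump_add ..

theorem bumpAt_zero (ind : List Int) (v : Int) : bumpAt ind v 0 = ind := by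
  simp only [bumpAt_eq_natBump]
  exact natBump_zero ..

-- add w at each element of xs
def addConst (xs : List Int) (w : Int) (ind : List Int) : List Int :=
  xs.foldl (fun ind v => bumpAt ind v w) ind

theorem addConst_nil (w : Int) (ind : List Int) : addConst [] w ind = ind := rfl

theorem addConst_cons (x : Int) (xs : List Int) (w : Int) (ind : List Int) :
    addConst (x :: xs) w ind = addConst xs w (bumpAt ind x w) := rfl

theorem bumpAt_addConst (xs : List Int) (w : Int) (ind : List Int) (v t : Int) :
    bumpAt (addConst xs w ind) v t = addConst xs w (bumpAt ind v t) := by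
  induction xs generalizing ind with
  | nil => rfl
  | cons x xs ih => simp only [addConst, List.foldl_cons] at *; rw [ih, bumpAt_comm]

theorem bumpAt_fillIndeg (xs : List Int) (k : Int) (ind : List Int) (v t : Int) :
    bumpAt (fillIndeg xs k ind) v t = fillIndeg xs k (bumpAt ind v t) := by
  induction xs generalizing k ind with
  | nil => rfl
  | cons x xs ih => simp only [fillIndeg]; rw [ih, bumpAt_comm]

theorem addConst_addConst (xs : List Int) (a b : Int) (ind : List Int) :
    addConst xs a (addConst xs b ind) = addConst xs (a + b) ind := by
  induction xs generalizing ind with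
  | nil => rfl
  | cons x xs ih =>
      show addConst xs a (bumpAt (addConst xs b (bumpAt ind x b)) x a)
        = addConst xs (a + b) (bumpAt ind x (a + b))
      rw [bumpAt_addConst, ih, bumpAt_add, Int.add_comm b a]

theorem addConst_fillIndeg (xs ys : List Int) (w k : Int) (ind : List Int) :
    addConst xs w (fillIndeg ys k ind) = fillIndeg ys k (addConst xs w ind) := by
  induction ys generalizing k ind with
  | nil => rfl
  | cons y ys ih => simp only [fillIndeg]; rw [ih, bumpAt_addConst]

theorem addConst_zero (xs : List Int) (ind : List Int) : addConst xs 0 ind = ind := by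
  induction xs generalizing ind with
  | nil => rfl
  | cons x xs ih =>
      show addConst xs 0 (bumpAt ind x 0) = ind
      rw [bumpAt_zero, ih]

theorem fillIndeg_snoc (xs : List Int) (y : Int) (k : Int) (ind : List Int) :
    fillIndeg (xs ++ [y]) k ind = bumpAt (fillIndeg xs k ind) y (k + (xs.length : Int)) := by
  induction xs generalizing k ind with
  | nil => simp [fillIndeg]
  | cons x xs ih =>
      simp only [List.cons_append, fillIndeg]
      rw [ih]
      congr 1
      simp only [List.length_cons]
      push_cast
      ring

-- the inner indegree loop of A adds 1 at every element of ranks[a:]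
theorem inner_ind (ranks : List Int) (k a : Nat) (h : a + k = ranks.length) (ind : List Int) :
    (List.range' a k).foldl (fun ind j => bumpAt ind (ranks.getD j 0) 1) ind
      = addConst (ranks.drop a) 1 ind := by
  induction k generalizing a ind with
  | zero =>
      have : a = ranks.length := by omega
      simp [this, addConst]
  | succ k ih =>
      have ha : a < ranks.length := by omega
      rw [List.range'_succ, List.foldl_cons, List.drop_eq_getElem_cons ha,
        ih (a + 1) (by omega)]
      simp only [addConst, List.foldl_cons]
      congr 2
      simp [List.getD, List.getElem?_eq_getElem ha]

-- a fold whose step acts componentwise splits into two folds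
theorem foldl_prod_split {α β γ : Type} (F : α → γ → α) (G : β → γ → β)
    (xs : List γ) (p : α × β) :
    xs.foldl (fun st x => (F st.1 x, G st.2 x)) p = (xs.foldl F p.1, xs.foldl G p.2) := by
  induction xs generalizing p with
  | nil => rfl
  | cons x xs ih => simp [ih]

-- A's outer loop, indegree component: invariant after the first m outer iterations
theorem outer_inv (ranks : List Int) (m : Nat) (hm : m ≤ ranks.length - 1) (ind : List Int) :
    (List.range m).foldl
        (fun ind i =>
          (List.range' (i + 1) (ranks.length - (i + 1))).foldl
            (fun ind j => bumpAt ind (ranks.getD j 0) 1) ind) ind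
      = fillIndeg ((ranks.drop 1).take m) 1
          (addConst ((ranks.drop 1).drop m) (m : Int) ind) := by
  induction m generalizing ind with
  | zero => simp [fillIndeg, addConst_zero]
  | succ m ih =>
      have hlen : (ranks.drop 1).length = ranks.length - 1 := by simp
      have hm' : m < (ranks.drop 1).length := by omega
      rw [List.range_succ, List.foldl_append, ih (by omega), List.foldl_cons, List.foldl_nil,
        inner_ind ranks (ranks.length - (m + 1)) (m + 1) (by omega)]
      have hdd : ranks.drop (m + 1) = (ranks.drop 1).drop m := by
        rw [List.drop_drop]; congr 1; omega
      rw [hdd, addConst_fillIndeg, addConst_addConst]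
      have htake : (ranks.drop 1).take (m + 1) = (ranks.drop 1).take m ++ [(ranks.drop 1)[m]] := by
        rw [List.take_add_one, List.getElem?_eq_getElem hm']; rfl
      have hdrop : (ranks.drop 1).drop m = (ranks.drop 1)[m] :: (ranks.drop 1).drop (m + 1) :=
        List.drop_eq_getElem_cons hm'
      rw [hdrop, addConst_cons, htake, fillIndeg_snoc, bumpAt_fillIndeg, bumpAt_addConst]
      rw [show ((m + 1 : Nat) : Int) = 1 + (m : Int) from by push_cast; ring]
      rw [show ((ranks.drop 1).take m).length = m from by rw [List.length_take]; omega]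

-- indegree components agree for any start list
theorem ind_eq (ranks : List Int) (ind : List Int) :
    (List.range (ranks.length - 1)).foldl
        (fun ind i =>
          (List.range' (i + 1) (ranks.length - (i + 1))).foldl
            (fun ind j => bumpAt ind (ranks.getD j 0) 1) ind) ind
      = fillIndeg (ranks.drop 1) 1 ind := by
  rcases Nat.eq_zero_or_pos ranks.length with h0 | h1
  · rw [List.length_eq_zero_iff] at h0; subst h0; rfl
  · rw [outer_inv ranks (ranks.length - 1) (Nat.le_refl _) ind]
    have h2 : (ranks.drop 1).drop (ranks.length - 1) = [] := by
      apply List.drop_eq_nil_of_le; simp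
    have h3 : (ranks.drop 1).take (ranks.length - 1) = ranks.drop 1 := by
      apply List.take_of_length_le; simp
    rw [h2, addConst_nil, h3]

-- A's inner graph loop sets an edge from cur to every element of ranks[a:]
theorem inner_graph (ranks : List Int) (c : Int) (k a : Nat) (h : a + k = ranks.length)
    (g : List (List Bool)) :
    (List.range' a k).foldl (fun g j => setEdge g c (ranks.getD j 0)) g
      = (ranks.drop a).foldl (fun g v => setEdge g c v) g := by
  induction k generalizing a g with
  | zero =>
      have : a = ranks.length := by omega
      simp [this]
  | succ k ih =>
      have ha : a < ranks.length := by omega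
      rw [List.range'_succ, List.foldl_cons, List.drop_eq_getElem_cons ha,
        List.foldl_cons, ih (a + 1) (by omega)]
      congr 2
      simp [List.getD, List.getElem?_eq_getElem ha]

-- A's index-driven outer graph loop over the suffix starting at a is B's structural peeling
theorem graph_suffix (ranks : List Int) (k a : Nat) (h : a + k = ranks.length)
    (g : List (List Bool)) :
    (List.range' a k).foldl
        (fun g i =>
          (List.range' (i + 1) (ranks.length - (i + 1))).foldl
            (fun g j => setEdge g (ranks.getD i 0) (ranks.getD j 0)) g) g
      = fillGraph g (ranks.drop a) := by
  induction k generalizing a g with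
  | zero =>
      have : a = ranks.length := by omega
      simp [this, fillGraph]
  | succ k ih =>
      have ha : a < ranks.length := by omega
      rw [List.range'_succ, List.foldl_cons, ih (a + 1) (by omega),
        List.drop_eq_getElem_cons ha]
      simp only [fillGraph]
      congr 1
      rw [inner_graph ranks _ (ranks.length - (a + 1)) (a + 1) (by omega)]
      congr 1
      simp [List.getD, List.getElem?_eq_getElem ha]

-- extending A's outer loop from L-1 to L iterations is harmless (the last inner loop is empty)
theorem graph_eq (ranks : List Int) (g : List (List Bool)) :
    (List.range (ranks.length - 1)).foldl
        (fun g i =>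
          (List.range' (i + 1) (ranks.length - (i + 1))).foldl
            (fun g j => setEdge g (ranks.getD i 0) (ranks.getD j 0)) g) g
      = fillGraph g ranks := by
  have hfull :
      (List.range ranks.length).foldl
          (fun g i =>
            (List.range' (i + 1) (ranks.length - (i + 1))).foldl
              (fun g j => setEdge g (ranks.getD i 0) (ranks.getD j 0)) g) g
        = fillGraph g ranks := by
    rw [List.range_eq_range']
    simpa using graph_suffix ranks ranks.length 0 (by omega) g
  rcases Nat.eq_zero_or_pos ranks.length with h0 | h1
  · rw [List.length_eq_zero_iff] at h0; subst h0; rfl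
  · obtain ⟨k, hk⟩ : ∃ k, ranks.length = k + 1 := ⟨ranks.length - 1, by omega⟩
    rw [← hfull, hk]
    simp only [Nat.add_sub_cancel]
    rw [List.range_succ, List.foldl_append, List.foldl_cons, List.foldl_nil]
    rw [show k + 1 - (k + 1) = 0 from by omega]
    rfl

-- ===== VERDICT (by name: the statement is the Claim_ definition above) =====
theorem makeRanksToGraph_spec : Claim_equal_makeRanksToGraph := by
  unfold Claim_equal_makeRanksToGraph
  intro ranks n _ _
  unfold Spec_makeRanksToGraph makeRanksToGraph makeRanksToGraph_alt
  simp only []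
  rw [show
      (fun (st : List (List Bool) × List Int) (i : Nat) =>
        (List.range' (i + 1) (ranks.length - (i + 1))).foldl
          (fun st j => (setEdge st.1 (ranks.getD i 0) (ranks.getD j 0),
            bumpAt st.2 (ranks.getD j 0) 1)) st)
      = fun (st : List (List Bool) × List Int) (i : Nat) =>
        ((List.range' (i + 1) (ranks.length - (i + 1))).foldl
            (fun g j => setEdge g (ranks.getD i 0) (ranks.getD j 0)) st.1,
         (List.range' (i + 1) (ranks.length - (i + 1))).foldl
            (fun ind j => bumpAt ind (ranks.getD j 0) 1) st.2)
    from funext fun st => funext fun i =>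
      foldl_prod_split (fun g j => setEdge g (ranks.getD i 0) (ranks.getD j 0))
        (fun ind j => bumpAt ind (ranks.getD j 0) 1)
        (List.range' (i + 1) (ranks.length - (i + 1))) st]
  rw [foldl_prod_split
    (fun g i => (List.range' (i + 1) (ranks.length - (i + 1))).foldl
        (fun g j => setEdge g (ranks.getD i 0) (ranks.getD j 0)) g)
    (fun ind i => (List.range' (i + 1) (ranks.length - (i + 1))).foldl
        (fun ind j => bumpAt ind (ranks.getD j 0) 1) ind)]
  exact Prod.ext (graph_eq ..) (ind_eq ..)
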